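-- pv_equiv track=rewrite | github.com/programmingemperor/discopop | graph_analyzer/plugins/mlp.py | get_independent_lines
-- ===== SOURCE A (Python) =====
-- def get_independent_lines(matrix):
--     res = []
--     for i in range(0, len(matrix)):
--         indep = True
--         for j in range(0, len(matrix)):
--             if i != j and (matrix[i][j] != 0 or matrix[j][i] != 0):
--                 indep = False
--         if indep:
--             res.append(i)
--     return res
-- ===== SOURCE B (Python) =====
-- def get_independent_lines(matrix):
--     n = len(matrix)
--     dependent = set()
--     for i in range(n):
--         for j in range(n):
--             if i != j and matrix[i][j] != 0:
--                 dependent.add(i)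
--                 dependent.add(j)
--     return [i for i in range(n) if i not in dependent]
-- ===== Notes on version B (the rewrite author's own statement) =====
-- stated objective: simpler
-- what changed: Instead of testing each index with an inner flag loop reading both matrix[i][j] and matrix[j][i], B makes one pass over all off-diagonal entries, marking both the row and the column index of every nonzero in a 'dependent' set, and returns the complement of that set over range(n).
import Mathlib
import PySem

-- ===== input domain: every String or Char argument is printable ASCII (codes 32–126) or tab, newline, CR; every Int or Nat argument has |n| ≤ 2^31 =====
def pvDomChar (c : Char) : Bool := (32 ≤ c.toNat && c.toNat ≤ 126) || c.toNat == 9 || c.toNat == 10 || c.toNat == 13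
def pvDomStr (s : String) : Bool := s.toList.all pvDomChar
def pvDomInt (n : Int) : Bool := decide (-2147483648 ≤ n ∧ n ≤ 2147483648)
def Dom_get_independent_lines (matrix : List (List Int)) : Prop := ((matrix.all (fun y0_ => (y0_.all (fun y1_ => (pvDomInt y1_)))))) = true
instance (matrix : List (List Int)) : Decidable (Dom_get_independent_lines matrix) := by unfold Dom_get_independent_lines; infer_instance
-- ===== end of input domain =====

-- B marks the row and column index of every off-diagonal nonzero in a set and returns the
-- complement over range(n), instead of A's per-index flag loop; objective: simpler.

-- ===== PORT A =====
-- matrix[i][j] with both indices in range under Pre_ (pyGetD = indexing, exact under Pre_)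
def pvEntry (matrix : List (List Int)) (i j : Int) : Int :=
  PySem.List.pyGetD (PySem.List.pyGetD matrix i []) j 0

def get_independent_lines (matrix : List (List Int)) : List Int :=
  (PySem.List.pyRange 0 (matrix.length : Int) 1).foldl (fun res i =>
    let indep := (PySem.List.pyRange 0 (matrix.length : Int) 1).foldl (fun indep j =>
      if i ≠ j ∧ (pvEntry matrix i j ≠ 0 ∨ pvEntry matrix j i ≠ 0) then false else indep) true
    if indep then res ++ [i] else res) []

-- ===== PORT B =====
def get_independent_lines_alt (matrix : List (List Int)) : List Int :=
  let n : Int := matrix.length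
  let dep : PySem.Set Int :=
    (PySem.List.pyRange 0 n 1).foldl (fun dep i =>
      (PySem.List.pyRange 0 n 1).foldl (fun dep j =>
        if i ≠ j ∧ pvEntry matrix i j ≠ 0 then
          PySem.Set.add (PySem.Set.add dep i) j
        else dep) dep) PySem.Set.empty
  (PySem.List.pyRange 0 n 1).filter (fun i => !(PySem.Set.contains dep i))

-- ===== PRECONDITION & SPEC =====
-- Pre_ excludes exactly the ragged matrices on which Python A raises IndexError:
-- some off-diagonal position (i, j) with row i shorter than j+1.
def Pre_get_independent_lines (matrix : List (List Int)) : Prop :=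
  ∀ i ∈ List.range matrix.length, ∀ j ∈ List.range matrix.length,
    i ≠ j → j < (matrix.getD i []).length
instance (matrix : List (List Int)) : Decidable (Pre_get_independent_lines matrix) := by
  unfold Pre_get_independent_lines; infer_instance

def pvWitness_get_independent_lines : List (List Int) := [[1, 0, 0], [0, 2, 3], [0, 3, 0]]

def Spec_get_independent_lines (matrix : List (List Int)) (out : List Int) : Prop := out = get_independent_lines_alt matrix
instance (matrix : List (List Int)) (out : List Int) : Decidable (Spec_get_independent_lines matrix out) := by unfold Spec_get_independent_lines; infer_instance

-- ===== CLAIM (what is proved, stated in full; the proofs are below) =====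
def Claim_equal_get_independent_lines : Prop := ∀ (matrix : List (List Int)), Dom_get_independent_lines matrix → Pre_get_independent_lines matrix → Spec_get_independent_lines matrix (get_independent_lines matrix)

-- ===== LEMMAS AND PROOFS =====

-- the inner flag loop of A computes an 'all'
theorem pv_foldl_flag (p : Int → Prop) [DecidablePred p] (l : List Int) (b : Bool) :
    l.foldl (fun b j => if p j then false else b) b
      = (b && l.all (fun j => !(decide (p j)))) := by
  induction l generalizing b with
  | nil => simp
  | cons a as ih =>
      simp only [List.foldl_cons, List.all_cons, ih]
      by_cases h : p a <;> simp [h]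

-- A's whole loop is a filter by the 'all' of the inner loop
theorem pv_A_filter (q : Int → Int → Prop) [inst : ∀ i j, Decidable (q i j)]
    (l R : List Int) (acc : List Int) :
    l.foldl (fun res i =>
        let indep := R.foldl (fun indep j => if q i j then false else indep) true
        if indep then res ++ [i] else res) acc
      = acc ++ l.filter (fun i => R.all (fun j => !(decide (q i j)))) := by
  induction l generalizing acc with
  | nil => simp
  | cons a as ih =>
      rw [List.foldl_cons, ih, List.filter_cons]
      show (if (R.foldl (fun indep j => if q a j then false else indep) true) = true
              then acc ++ [a] else acc) ++ _ = _
      rw [pv_foldl_flag]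
      simp only [Bool.true_and]
      by_cases h : (R.all fun j => !decide (q a j)) = true
      · simp [h]
      · simp [h]

theorem pv_mem_set_add (s : PySem.Set Int) (x y : Int) :
    y ∈ PySem.Set.add s x ↔ y ∈ s ∨ y = x := by
  simp [PySem.Set.add, PySem.Set.contains]
  split_ifs with h <;> simp_all [eq_comm]
  rintro rfl; exact h

theorem pv_contains_iff (s : PySem.Set Int) (x : Int) :
    PySem.Set.contains s x = true ↔ x ∈ s := by
  simp [PySem.Set.contains]

-- membership after B's inner marking loop
theorem pv_inner_mem (matrix : List (List Int)) (i : Int) (l : List Int)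
    (s : PySem.Set Int) (v : Int) :
    v ∈ l.foldl (fun dep j =>
        if i ≠ j ∧ pvEntry matrix i j ≠ 0 then
          PySem.Set.add (PySem.Set.add dep i) j
        else dep) s
      ↔ v ∈ s ∨ ∃ j ∈ l, (i ≠ j ∧ pvEntry matrix i j ≠ 0) ∧ (v = i ∨ v = j) := by
  induction l generalizing s with
  | nil => simp
  | cons a as ih =>
      simp only [List.foldl_cons, ih, List.mem_cons]
      by_cases h : i ≠ a ∧ pvEntry matrix i a ≠ 0
      · simp only [if_pos h, pv_mem_set_add]
        constructor
        · rintro (((hs | hv) | hv) | ⟨j, hj, hc, hv⟩)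
          · exact Or.inl hs
          · exact Or.inr ⟨a, Or.inl rfl, h, Or.inl hv⟩
          · exact Or.inr ⟨a, Or.inl rfl, h, Or.inr hv⟩
          · exact Or.inr ⟨j, Or.inr hj, hc, hv⟩
        · rintro (hs | ⟨j, rfl | hj, hc, hv⟩)
          · exact Or.inl (Or.inl (Or.inl hs))
          · rcases hv with hv | hv
            · exact Or.inl (Or.inl (Or.inr hv))
            · exact Or.inl (Or.inr hv)
          · exact Or.inr ⟨j, hj, hc, hv⟩
      · simp only [if_neg h]
        constructor
        · rintro (hs | ⟨j, hj, hc, hv⟩)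
          · exact Or.inl hs
          · exact Or.inr ⟨j, Or.inr hj, hc, hv⟩
        · rintro (hs | ⟨j, rfl | hj, hc, hv⟩)
          · exact Or.inl hs
          · exact absurd hc h
          · exact Or.inr ⟨j, hj, hc, hv⟩

-- membership after B's whole marking pass
theorem pv_outer_mem (matrix : List (List Int)) (R : List Int) (l : List Int)
    (s : PySem.Set Int) (v : Int) :
    v ∈ l.foldl (fun dep i =>
        R.foldl (fun dep j =>
          if i ≠ j ∧ pvEntry matrix i j ≠ 0 then
            PySem.Set.add (PySem.Set.add dep i) j
          else dep) dep) s
      ↔ v ∈ s ∨ ∃ i ∈ l, ∃ j ∈ R, (i ≠ j ∧ pvEntry matrix i j ≠ 0) ∧ (v = i ∨ v = j) := by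
  induction l generalizing s with
  | nil => simp
  | cons a as ih =>
      simp only [List.foldl_cons, ih, pv_inner_mem, List.mem_cons]
      constructor
      · rintro ((hs | ⟨j, hj, hc, hv⟩) | ⟨i, hi, j, hj, hc, hv⟩)
        · exact Or.inl hs
        · exact Or.inr ⟨a, Or.inl rfl, j, hj, hc, hv⟩
        · exact Or.inr ⟨i, Or.inr hi, j, hj, hc, hv⟩
      · rintro (hs | ⟨i, rfl | hi, j, hj, hc, hv⟩)
        · exact Or.inl (Or.inl hs)
        · exact Or.inl (Or.inr ⟨j, hj, hc, hv⟩)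
        · exact Or.inr ⟨i, hi, j, hj, hc, hv⟩

-- ===== VERDICT (by name: the statement is the Claim_ definition above) =====
theorem get_independent_lines_spec : Claim_equal_get_independent_lines := by
  intro matrix _ _
  unfold Spec_get_independent_lines get_independent_lines get_independent_lines_alt
  set R := PySem.List.pyRange 0 (matrix.length : Int) 1 with hR
  rw [pv_A_filter (q := fun i j => i ≠ j ∧ (pvEntry matrix i j ≠ 0 ∨ pvEntry matrix j i ≠ 0))]
  rw [List.nil_append]
  apply List.filter_congr
  intro i hi
  set dep : PySem.Set Int := R.foldl (fun dep i =>
      R.foldl (fun dep j =>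
        if i ≠ j ∧ pvEntry matrix i j ≠ 0 then
          PySem.Set.add (PySem.Set.add dep i) j
        else dep) dep) PySem.Set.empty with hdep
  have hmem : PySem.Set.contains dep i = true
      ↔ ∃ a ∈ R, ∃ b ∈ R, (a ≠ b ∧ pvEntry matrix a b ≠ 0) ∧ (i = a ∨ i = b) := by
    rw [pv_contains_iff, hdep, pv_outer_mem]
    simp [PySem.Set.empty]
  rw [Bool.eq_iff_iff]
  rw [show ((!(PySem.Set.contains dep i)) = true) ↔ ¬ (PySem.Set.contains dep i = true) by
    cases (PySem.Set.contains dep i) <;> simp]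
  rw [hmem]
  simp only [List.all_eq_true, Bool.not_eq_eq_eq_not, Bool.not_true, decide_eq_false_iff_not]
  constructor
  · rintro h ⟨a, ha, b, hb, ⟨hab, hnz⟩, hx⟩
    rcases hx with rfl | rfl
    · exact h b hb ⟨hab, Or.inl hnz⟩
    · exact h a ha ⟨Ne.symm hab, Or.inr hnz⟩
  · rintro h j hj ⟨hij, h1 | h2⟩
    · exact h ⟨i, hi, j, hj, ⟨hij, h1⟩, Or.inl rfl⟩
    · exact h ⟨j, hj, i, hi, ⟨Ne.symm hij, h2⟩, Or.inr rfl⟩
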